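-- pv_equiv track=rewrite | github.com/Juancabarrera26/Quiz-AFD | Quiz_AFD/AFD.py | afd
-- ===== SOURCE A (Python) =====
-- def afd(cadena):
--     estado = 0
--     for caracter in cadena:
--         if estado == 0:
--             if caracter == '+': estado = 1
--             elif 'A' <= caracter <= 'Z': estado = 3
--             else: return "NO ACEPTA"
--         elif estado == 1:
--             if caracter == '+': estado = 2
--             else: return "NO ACEPTA"
--         elif estado == 2:
--             return "NO ACEPTA"
--         elif estado == 3:
--             if ('a' <= caracter <= 'z') or ('0' <= caracter <= '9'): estado = 3
--             else: return "NO ACEPTA"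
--
--     if estado == 1: return "SUMA"
--     if estado == 2: return "INCR"
--     if estado == 3: return "ID"
--     return "NO ACEPTA"
-- ===== SOURCE B (Python) =====
-- def afd(cadena):
--     chars = list(cadena)
--     if chars == ['+']:
--         return "SUMA"
--     if chars == ['+', '+']:
--         return "INCR"
--     if chars and 'A' <= chars[0] <= 'Z' and all(
--             ('a' <= c <= 'z') or ('0' <= c <= '9') for c in chars[1:]):
--         return "ID"
--     return "NO ACEPTA"
-- ===== Notes on version B (the rewrite author's own statement) =====
-- stated objective: simpler
-- what changed: Replaces the explicit DFA state-machine loop with whole-string structural checks: compare against the literals '+' and '++', then test identifier shape (uppercase first char, lowercase/digit rest) with all() over the tail.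
import Mathlib
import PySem

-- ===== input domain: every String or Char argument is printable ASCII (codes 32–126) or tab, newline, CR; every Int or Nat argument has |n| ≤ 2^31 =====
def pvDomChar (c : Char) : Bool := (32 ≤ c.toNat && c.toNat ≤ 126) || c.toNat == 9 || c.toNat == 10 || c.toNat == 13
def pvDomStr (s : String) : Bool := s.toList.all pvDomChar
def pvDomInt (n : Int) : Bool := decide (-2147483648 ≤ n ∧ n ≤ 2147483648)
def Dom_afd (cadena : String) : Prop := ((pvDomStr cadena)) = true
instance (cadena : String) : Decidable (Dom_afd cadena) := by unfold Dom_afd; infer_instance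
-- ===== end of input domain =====

-- B replaces A's DFA state loop with whole-string structural checks; objective: simpler.

-- ===== PORT A =====
-- literal transliteration of A's for-loop over the characters, carrying the state `estado`;
-- an early `return "NO ACEPTA"` is the corresponding branch result.
def afdLoop (estado : Int) : List Char → String
  | [] =>
    if estado = 1 then "SUMA"
    else if estado = 2 then "INCR"
    else if estado = 3 then "ID"
    else "NO ACEPTA"
  | c :: rest =>
    if estado = 0 then
      if c = '+' then afdLoop 1 rest
      else if 'A' ≤ c ∧ c ≤ 'Z' then afdLoop 3 rest
      else "NO ACEPTA"
    else if estado = 1 then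
      if c = '+' then afdLoop 2 rest else "NO ACEPTA"
    else if estado = 2 then "NO ACEPTA"
    else if estado = 3 then
      if ('a' ≤ c ∧ c ≤ 'z') ∨ ('0' ≤ c ∧ c ≤ '9') then afdLoop 3 rest
      else "NO ACEPTA"
    else afdLoop estado rest

def afd (cadena : String) : String := afdLoop 0 cadena.toList

-- ===== PORT B =====
def afdIdTail (c : Char) : Bool := ('a' ≤ c && c ≤ 'z') || ('0' ≤ c && c ≤ '9')

def afd_alt (cadena : String) : String :=
  let chars := cadena.toList
  if chars = ['+'] then "SUMA"
  else if chars = ['+', '+'] then "INCR"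
  else
    match chars with
    | c :: rest =>
      if ('A' ≤ c && c ≤ 'Z') && rest.all afdIdTail then "ID" else "NO ACEPTA"
    | [] => "NO ACEPTA"

-- ===== PRECONDITION & SPEC =====
def Spec_afd (cadena : String) (out : String) : Prop := out = afd_alt cadena
instance (cadena : String) (out : String) : Decidable (Spec_afd cadena out) := by unfold Spec_afd; infer_instance

-- ===== CLAIM (what is proved, stated in full; the proofs are below) =====
def Claim_equal_afd : Prop := ∀ (cadena : String), Dom_afd cadena → Spec_afd cadena (afd cadena)

-- ===== LEMMAS AND PROOFS =====

lemma afdLoop_three (l : List Char) :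
    afdLoop 3 l = if l.all afdIdTail then "ID" else "NO ACEPTA" := by
  induction l with
  | nil => simp [afdLoop]
  | cons c rest ih =>
    have hstep : afdLoop 3 (c :: rest) =
        if ('a' ≤ c ∧ c ≤ 'z') ∨ ('0' ≤ c ∧ c ≤ '9') then afdLoop 3 rest
        else "NO ACEPTA" := by
      simp [afdLoop]
    rw [hstep]
    by_cases h : ('a' ≤ c ∧ c ≤ 'z') ∨ ('0' ≤ c ∧ c ≤ '9')
    · rw [if_pos h, ih]
      have hb : afdIdTail c = true := by
        simp only [afdIdTail, Bool.or_eq_true, Bool.and_eq_true, decide_eq_true_eq]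
        exact h
      simp [List.all_cons, hb]
    · rw [if_neg h]
      have hb : afdIdTail c = false := by
        simp only [afdIdTail, Bool.or_eq_false_iff, Bool.and_eq_false_iff,
          decide_eq_false_iff_not]
        constructor
        · by_cases h1 : 'a' ≤ c
          · exact Or.inr (fun h2 => h (Or.inl ⟨h1, h2⟩))
          · exact Or.inl h1
        · by_cases h1 : '0' ≤ c
          · exact Or.inr (fun h2 => h (Or.inr ⟨h1, h2⟩))
          · exact Or.inl h1
      simp [List.all_cons, hb]

lemma afd_eq (cadena : String) : afd cadena = afd_alt cadena := by
  unfold afd afd_alt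
  cases h : cadena.toList with
  | nil => simp [afdLoop]
  | cons c rest =>
    by_cases hc : c = '+'
    · subst hc
      cases rest with
      | nil => simp [afdLoop]
      | cons d rest2 =>
        by_cases hd : d = '+'
        · subst hd
          cases rest2 with
          | nil => simp [afdLoop]
          | cons e rest3 => simp [afdLoop]
        · simp [afdLoop, hd]
    · have h1 : ¬ (c :: rest = ['+']) := by simp [hc]
      have h2 : ¬ (c :: rest = ['+', '+']) := by simp [hc]
      have hstep : afdLoop 0 (c :: rest) =
          if 'A' ≤ c ∧ c ≤ 'Z' then afdLoop 3 rest else "NO ACEPTA" := by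
        simp [afdLoop, hc]
      rw [hstep, if_neg h1, if_neg h2]
      by_cases hu : 'A' ≤ c ∧ c ≤ 'Z'
      · rw [if_pos hu, afdLoop_three]
        have hb : ('A' ≤ c && c ≤ 'Z') = true := by simp [hu.1, hu.2]
        simp [hb]
      · rw [if_neg hu]
        have hb : ('A' ≤ c && c ≤ 'Z') = false := by
          simp only [Bool.and_eq_false_iff, decide_eq_false_iff_not]
          by_cases h1 : 'A' ≤ c
          · exact Or.inr (fun h2 => hu ⟨h1, h2⟩)
          · exact Or.inl h1
        simp [hb]

-- ===== VERDICT (by name: the statement is the Claim_ definition above) =====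
theorem afd_spec : Claim_equal_afd := by
  intro cadena _
  unfold Spec_afd
  exact afd_eq cadena
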